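-- pv_equiv track=rewrite | github.com/martinluque12/Programacion-y-Laboratorio-1-Primer-cuatrimestre-UTN | Clase 7/Stark/funciones.py | listar_heroes_color_ojos
-- ===== SOURCE A (Python) =====
-- def listar_heroes_color_ojos(lista: list)->dict|int:
--     '''
--     '''
--     retorno = -1
--
--     if type(lista) == type(list()) and len(lista) > 0:
--         heroes_color_ojos = {}
--
--         for heroe in lista:
--             ojos = heroe["color_ojos"]
--             if ojos not in heroes_color_ojos:
--                 heroes_color_ojos[ojos] = []
--
--             heroes_color_ojos[ojos].append(heroe["nombre"])
--
--             retorno = heroes_color_ojos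
--
--     return retorno
-- ===== SOURCE B (Python) =====
-- def listar_heroes_color_ojos(lista: list) -> dict | int:
--     # Two-pass regrouping: collect distinct eye colors in first-appearance
--     # order, then build each group by filtering the list per color.
--     if type(lista) == list and len(lista) > 0:
--         colores = []
--         for heroe in lista:
--             c = heroe["color_ojos"]
--             if c not in colores:
--                 colores.append(c)
--         return {c: [h["nombre"] for h in lista if h["color_ojos"] == c]
--                 for c in colores}
--     return -1
-- ===== Notes on version B (the rewrite author's own statement) =====
-- stated objective: alternative
-- what changed: Replaces the single accumulating dict-building pass with two differently shaped passes: one pass collecting the distinct eye colors in first-appearance order, then one filtering pass per color building each name group.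
-- outside the precondition, e.g. on listar_heroes_color_ojos([]): A returns -1, B returns -1
import Mathlib
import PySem

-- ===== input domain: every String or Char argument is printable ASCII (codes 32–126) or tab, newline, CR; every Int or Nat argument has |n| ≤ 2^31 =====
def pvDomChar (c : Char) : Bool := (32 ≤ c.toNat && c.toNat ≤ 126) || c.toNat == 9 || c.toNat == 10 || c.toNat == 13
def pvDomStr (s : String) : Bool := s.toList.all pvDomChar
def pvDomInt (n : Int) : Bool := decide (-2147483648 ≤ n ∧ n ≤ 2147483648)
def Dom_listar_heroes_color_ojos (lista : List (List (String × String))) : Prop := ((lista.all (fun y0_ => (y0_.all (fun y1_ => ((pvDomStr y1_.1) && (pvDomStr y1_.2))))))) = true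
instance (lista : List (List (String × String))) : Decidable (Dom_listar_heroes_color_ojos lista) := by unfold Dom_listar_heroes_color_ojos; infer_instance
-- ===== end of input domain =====

-- B regroups in two passes (distinct colors first, then a filter per color) instead of A's
-- single accumulating dict pass; alternative decomposition, same result.

-- ===== PORT A =====
-- On an empty list Python A returns the int sentinel -1 (not a dict); that input is outside
-- Pre_, and the port returns [] there.
def listar_heroes_color_ojos (lista : List (List (String × String))) : List (String × List String) :=
  if 0 < lista.length then
    (lista.foldl (fun d heroe =>
        let ojos := (PySem.Dict.mk heroe).getD "color_ojos" ""
        let d' := if d.contains ojos then d else d.insert ojos []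
        d'.modify ojos [] (fun l => l ++ [(PySem.Dict.mk heroe).getD "nombre" ""]))
      PySem.Dict.empty).items
  else []

-- ===== PORT B =====
def pvColores (lista : List (List (String × String))) : List String :=
  lista.foldl (fun acc heroe =>
    PySem.Set.add acc ((PySem.Dict.mk heroe).getD "color_ojos" "")) []

def listar_heroes_color_ojos_alt (lista : List (List (String × String))) : List (String × List String) :=
  if 0 < lista.length then
    (pvColores lista).map (fun c =>
      (c, (lista.filter (fun h => (PySem.Dict.mk h).getD "color_ojos" "" == c)).map
            (fun h => (PySem.Dict.mk h).getD "nombre" "")))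
  else []

-- ===== PRECONDITION & SPEC =====
-- Pre_ excludes the empty list (there A returns the int -1, not a value of the dict return
-- type) and heroes missing the "color_ojos" or "nombre" key (there A raises KeyError).
def Pre_listar_heroes_color_ojos (lista : List (List (String × String))) : Prop :=
  lista ≠ [] ∧ ∀ h ∈ lista, "color_ojos" ∈ h.map Prod.fst ∧ "nombre" ∈ h.map Prod.fst
instance (lista : List (List (String × String))) : Decidable (Pre_listar_heroes_color_ojos lista) := by unfold Pre_listar_heroes_color_ojos; infer_instance

def pvWitness_listar_heroes_color_ojos : (List (List (String × String))) :=
  [[("color_ojos", "azul"), ("nombre", "Tony")], [("color_ojos", "verde"), ("nombre", "Hulk")]]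

def Spec_listar_heroes_color_ojos (lista : List (List (String × String))) (out : List (String × List String)) : Prop := out = listar_heroes_color_ojos_alt lista
instance (lista : List (List (String × String))) (out : List (String × List String)) : Decidable (Spec_listar_heroes_color_ojos lista out) := by unfold Spec_listar_heroes_color_ojos; infer_instance

-- ===== CLAIM (what is proved, stated in full; the proofs are below) =====
def Claim_equal_listar_heroes_color_ojos : Prop := ∀ (lista : List (List (String × String))), Dom_listar_heroes_color_ojos lista → Pre_listar_heroes_color_ojos lista → Spec_listar_heroes_color_ojos lista (listar_heroes_color_ojos lista)

-- ===== LEMMAS AND PROOFS =====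

-- A's per-hero step (ensure the key, then append) is one 'modify' with default [].
theorem pvStepEq (d : PySem.Dict String (List String)) (k n : String) :
    PySem.Dict.modify (if d.contains k then d else d.insert k []) k [] (fun l => l ++ [n])
      = d.modify k [] (fun l => l ++ [n]) := by
  by_cases h : d.contains k = true
  · simp [h]
  · have h' : d.contains k = false := by simpa using h
    simp [PySem.Dict.modify, h', PySem.Dict.getD_insert_self,
      PySem.Dict.insert_insert_self, PySem.Dict.getD_of_not_contains]

theorem listar_heroes_color_ojos_spec : Claim_equal_listar_heroes_color_ojos := by
  intro lista _ hpre
  obtain ⟨hne, -⟩ := hpre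
  have hlen : 0 < lista.length := List.length_pos_iff.mpr hne
  unfold Spec_listar_heroes_color_ojos listar_heroes_color_ojos listar_heroes_color_ojos_alt
  simp only [hlen, if_pos]
  -- rewrite A's fold step into a plain modify, then into a fold over (color, name) pairs
  have hfold :
      (lista.foldl (fun d heroe =>
          let ojos := (PySem.Dict.mk heroe).getD "color_ojos" ""
          let d' := if d.contains ojos then d else d.insert ojos []
          d'.modify ojos [] (fun l => l ++ [(PySem.Dict.mk heroe).getD "nombre" ""]))
        PySem.Dict.empty)
      = ((lista.map (fun h => ((PySem.Dict.mk h).getD "color_ojos" "",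
                               (PySem.Dict.mk h).getD "nombre" ""))).foldl
          (fun d p => d.modify p.1 [] (fun l => l ++ [p.2])) PySem.Dict.empty) := by
    rw [List.foldl_map]
    simp only [pvStepEq]
  rw [hfold]
  set l := lista.map (fun h => ((PySem.Dict.mk h).getD "color_ojos" "",
                                (PySem.Dict.mk h).getD "nombre" "")) with hl
  set D := l.foldl (fun d p => d.modify p.1 [] (fun l => l ++ [p.2])) PySem.Dict.empty with hD
  have hnd : D.keys.Nodup := by
    rw [hD]
    exact PySem.Dict.nodup_keys_foldl_modify_key l Prod.fst [] _ _ PySem.Dict.nodup_keys_empty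
  have hkeys : D.keys = pvColores lista := by
    rw [hD, PySem.Dict.keys_foldl_modify_key]
    unfold pvColores
    rw [hl, List.map_map, ← PySem.Set.update_map_eq_foldl_add, PySem.Set.update_nil_left,
      PySem.Dict.keys_empty, PySem.Set.update_nil_left]
    rfl
  rw [PySem.Dict.items_eq_map_keys D hnd [], hkeys]
  apply List.map_congr_left
  intro c _
  have hg : D.getD c [] = (l.filter (fun p => p.1 == c)).map (·.2) := by
    rw [hD, PySem.Dict.getD_foldl_modify_append, PySem.Dict.getD_empty]
    simp
  rw [hg, hl, List.filter_map, List.map_map]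
  rfl
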